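-- pv_equiv track=rewrite | github.com/soumeet/apriori-algorithm | test10.py | distinct_items
-- ===== SOURCE A (Python) =====
-- from collections import Counter
--
-- def distinct_items(transactions, support=None):
--     """Returns counted set of distinct items in transactions"""
--     counter = Counter()
--     for trans in transactions:
--         counter.update(trans)
--
--     if support is not None:
--         return set(item for item in counter if counter[item] >= support)
--     else:
--         return set(counter)
-- ===== SOURCE B (Python) =====
-- def distinct_items(transactions, support=None):
--     """Returns counted set of distinct items in transactions"""
--     seen = []
--     for trans in transactions:
--         for item in trans:
--             if item not in seen:
--                 seen.append(item)
--     if support is None: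
--         return set(seen)
--     return set(item for item in seen
--                if sum(trans.count(item) for trans in transactions) >= support)
-- ===== Notes on version B (the rewrite author's own statement) =====
-- stated objective: alternative
-- what changed: B never counts into a dict: it first builds the ordered distinct-item list by membership checks, then (only when support is given) re-counts each distinct item by summing list.count over the transactions, replacing A's single Counter pass with staged per-item scans.
import Mathlib
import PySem

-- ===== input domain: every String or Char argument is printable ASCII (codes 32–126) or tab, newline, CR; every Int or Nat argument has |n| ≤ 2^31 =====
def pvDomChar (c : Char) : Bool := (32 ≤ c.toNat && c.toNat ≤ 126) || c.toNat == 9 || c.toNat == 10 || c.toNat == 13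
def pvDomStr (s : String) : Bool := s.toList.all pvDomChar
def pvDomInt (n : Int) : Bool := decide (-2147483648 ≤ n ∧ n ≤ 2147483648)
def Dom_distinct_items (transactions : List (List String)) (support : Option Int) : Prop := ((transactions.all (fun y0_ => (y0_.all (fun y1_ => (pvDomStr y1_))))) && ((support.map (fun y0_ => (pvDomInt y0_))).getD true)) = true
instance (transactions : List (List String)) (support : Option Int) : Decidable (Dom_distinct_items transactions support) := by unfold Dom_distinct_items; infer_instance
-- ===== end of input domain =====

-- B builds the distinct list by membership checks and, when support is given, re-counts each
-- distinct item by summing trans.count over the transactions — no Counter/dict pass at all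
-- (alternative decomposition, same exact values).


-- ===== PORT A =====
-- counter = Counter(); for trans in transactions: counter.update(trans)  — Counter.update adds 1 per element
def distinct_items (transactions : List (List String)) (support : Option Int) : List String :=
  let counter : PySem.Dict String Int :=
    transactions.foldl (fun counter trans =>
      trans.foldl (fun d x => d.modify x 0 (· + 1)) counter) PySem.Dict.empty
  match support with
  | some s => PySem.Set.ofList (counter.keys.filter (fun item => s ≤ counter.getD item 0))
  | none => PySem.Set.ofList counter.keys

-- ===== PORT B =====
-- seen = []; for trans: for item: if item not in seen: seen.append(item);
-- then set(seen) or set(item for item in seen if sum(trans.count(item) for trans) >= support)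
def distinct_items_alt (transactions : List (List String)) (support : Option Int) : List String :=
  let seen : List String :=
    transactions.foldl (fun seen trans =>
      trans.foldl (fun seen item =>
        if PySem.Set.contains seen item then seen else seen ++ [item]) seen) []
  match support with
  | none => PySem.Set.ofList seen
  | some s =>
    PySem.Set.ofList (seen.filter (fun item =>
      s ≤ transactions.foldl (fun (acc : Int) (trans : List String) => acc + (trans.count item : Int)) 0))

-- ===== PRECONDITION & SPEC =====
def Spec_distinct_items (transactions : List (List String)) (support : Option Int) (out : List String) : Prop := out = distinct_items_alt transactions support
instance (transactions : List (List String)) (support : Option Int) (out : List String) : Decidable (Spec_distinct_items transactions support out) := by unfold Spec_distinct_items; infer_instance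

-- ===== CLAIM (what is proved, stated in full; the proofs are below) =====
def Claim_equal_distinct_items : Prop := ∀ (transactions : List (List String)) (support : Option Int), Dom_distinct_items transactions support → Spec_distinct_items transactions support (distinct_items transactions support)

-- ===== LEMMAS AND PROOFS =====

-- B's inner membership loop is exactly PySem.Set.update
lemma seen_eq_set_update (ts : List (List String)) (s : List String) :
    ts.foldl (fun seen trans =>
      trans.foldl (fun seen item =>
        if PySem.Set.contains seen item then seen else seen ++ [item]) seen) s
      = ts.foldl (fun seen trans => PySem.Set.update seen trans) s := rfl

-- the keys of A's counting fold are B's seen list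
lemma keys_counting_fold (ts : List (List String)) (d : PySem.Dict String Int) :
    (ts.foldl (fun c trans => trans.foldl (fun d x => d.modify x 0 (· + 1)) c) d).keys
      = ts.foldl (fun s trans => PySem.Set.update s trans) d.keys := by
  induction ts generalizing d with
  | nil => rfl
  | cons t ts ih => simp only [List.foldl_cons, ih, PySem.Dict.keys_foldl_modify]

-- A's counter lookup is B's sum of per-transaction counts
lemma getD_counting_fold (ts : List (List String)) (d : PySem.Dict String Int) (v : String) :
    (ts.foldl (fun c trans => trans.foldl (fun d x => d.modify x 0 (· + 1)) c) d).getD v 0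
      = d.getD v 0 + ts.foldl (fun (acc : Int) (trans : List String) => acc + (trans.count v : Int)) 0 := by
  induction ts generalizing d with
  | nil => simp
  | cons t ts ih =>
    simp only [List.foldl_cons, ih, PySem.Dict.getD_foldl_modify_add_one,
      PySem.List.foldl_add (g := fun trans : List String => (trans.count v : Int))]
    simp [add_assoc]

-- ===== VERDICT (by name: the statement is the Claim_ definition above) =====
theorem distinct_items_spec : Claim_equal_distinct_items := by
  intro transactions support _
  cases support with
  | none =>
    simp only [Spec_distinct_items, distinct_items, distinct_items_alt,
      seen_eq_set_update, keys_counting_fold]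
    rfl
  | some s =>
    simp only [Spec_distinct_items, distinct_items, distinct_items_alt,
      seen_eq_set_update, keys_counting_fold]
    congr 1
    apply List.filter_congr
    intro x _
    simp [getD_counting_fold, PySem.Dict.getD_empty]
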